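-- pv_equiv track=rewrite | github.com/pypi-data/pypi-mirror-114 | packages/fetching/fetching-0.2.0.tar.gz/fetching-0.2.0/fetching/fetching.py | _filter_main
-- ===== SOURCE A (Python) =====
-- def _filter_main(f: str):
--     """
--     extract contents of file up until main invocation, if it exists
--     """
--
--     lines = f.split("\n")
--     ret = []
--     for l in lines:
--         if ("if __name__ == '__main__'" in l) or ("if __name__ == \"__main__\"" in l):
--             break
--         else:
--             ret.append(l)
--
--     return "\n".join(ret)
-- ===== SOURCE B (Python) =====
-- def _filter_main(f: str):
--     """
--     extract contents of file up until main invocation, if it exists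
--     """
--     i1 = f.find("if __name__ == '__main__'")
--     i2 = f.find('if __name__ == "__main__"')
--     if i1 == -1 and i2 == -1:
--         return f
--     idx = i2 if i1 == -1 else (i1 if i2 == -1 else min(i1, i2))
--     start = f.rfind("\n", 0, idx)
--     return "" if start == -1 else f[:start]
-- ===== Notes on version B (the rewrite author's own statement) =====
-- stated objective: simpler
-- what changed: A splits the text into lines and runs a Python loop accumulating lines until one contains a __main__ guard, then re-joins; B never builds the line list: it locates the earliest occurrence of either guard with str.find, finds the start of that line with one backward rfind for the preceding newline, and returns a single slice (or the input unchanged when no guard exists).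
import Mathlib
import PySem

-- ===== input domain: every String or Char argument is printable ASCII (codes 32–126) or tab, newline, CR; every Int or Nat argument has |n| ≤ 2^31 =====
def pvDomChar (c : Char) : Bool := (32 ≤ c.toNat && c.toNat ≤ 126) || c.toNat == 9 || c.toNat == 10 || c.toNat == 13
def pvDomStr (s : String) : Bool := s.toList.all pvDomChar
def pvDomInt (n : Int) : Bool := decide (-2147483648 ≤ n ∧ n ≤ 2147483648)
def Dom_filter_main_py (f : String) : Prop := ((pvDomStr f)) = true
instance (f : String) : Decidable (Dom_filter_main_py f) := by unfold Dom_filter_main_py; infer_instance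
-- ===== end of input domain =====

-- B replaces A's split/accumulate/join line loop by a direct substring search (str.find) plus one
-- backward newline search and a slice; objective: simpler (no line list, one slice).

-- ===== PORT A =====
def pvM1 : List Char := String.toList "if __name__ == '__main__'"
def pvM2 : List Char := String.toList "if __name__ == \"__main__\""

def pvHasMain (l : List Char) : Bool :=
  PySem.Chars.isIn pvM1 l || PySem.Chars.isIn pvM2 l

-- the 'for l in lines: … break … ret.append(l)' loop, with 'ret' the accumulator
def pvLoopA : List (List Char) → List (List Char) → List (List Char)
  | [], ret => ret
  | l :: ls, ret => if pvHasMain l then ret else pvLoopA ls (ret ++ [l])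

def filter_main_py (f : String) : String :=
  String.ofList (PySem.Chars.join ['\n'] (pvLoopA (PySem.Chars.splitOn f.toList ['\n']) []))

-- ===== PORT B =====
def filter_main_py_alt (f : String) : String :=
  let i1 := PySem.Str.find f "if __name__ == '__main__'"
  let i2 := PySem.Str.find f "if __name__ == \"__main__\""
  if i1 = -1 ∧ i2 = -1 then f
  else
    let idx := if i1 = -1 then i2 else if i2 = -1 then i1 else min i1 i2
    let start := PySem.Str.rfindFrom f "\n" 0 (some idx)
    if start = -1 then "" else PySem.Str.slice f none (some start)

-- ===== PRECONDITION & SPEC =====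
def Spec_filter_main_py (f : String) (out : String) : Prop := out = filter_main_py_alt f
instance (f : String) (out : String) : Decidable (Spec_filter_main_py f out) := by unfold Spec_filter_main_py; infer_instance

-- ===== CLAIM (what is proved, stated in full; the proofs are below) =====
def Claim_equal_filter_main_py : Prop := ∀ (f : String), Dom_filter_main_py f → Spec_filter_main_py f (filter_main_py f)

-- ===== LEMMAS AND PROOFS =====

def pvS : List Char → List (List Char)
  | [] => [[]]
  | ch :: r => if ch = '\n' then [] :: pvS r else
      match pvS r with
      | [] => [[ch]]
      | x :: xs => (ch :: x) :: xs

theorem pvS_ne_nil (c : List Char) : pvS c ≠ [] := by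
  cases c with
  | nil => simp [pvS]
  | cons ch r =>
    simp only [pvS]
    split
    · simp
    · split <;> simp

theorem pvS_no_nl (c : List Char) (h : '\n' ∉ c) : pvS c = [c] := by
  induction c with
  | nil => rfl
  | cons ch r ih =>
    simp only [List.mem_cons, not_or] at h
    simp only [pvS, if_neg (Ne.symm h.1), ih h.2]

theorem pvS_append (a r : List Char) (h : '\n' ∉ a) :
    pvS (a ++ '\n' :: r) = a :: pvS r := by
  induction a with
  | nil => simp [pvS]
  | cons ch t ih =>
    simp only [List.mem_cons, not_or] at h
    simp only [List.cons_append, pvS, if_neg (Ne.symm h.1), ih h.2]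

theorem pvS_head (c : List Char) :
    ∃ t, pvS c = c.take (List.idxOf '\n' c) :: t := by
  induction c with
  | nil => exact ⟨[], rfl⟩
  | cons ch r ih =>
    by_cases hc : ch = '\n'
    · subst hc
      refine ⟨pvS r, ?_⟩
      simp [pvS, List.idxOf_cons]
    · obtain ⟨t, ht⟩ := ih
      refine ⟨t, ?_⟩
      simp only [pvS, if_neg hc, ht]
      have : List.idxOf '\n' (ch :: r) = List.idxOf '\n' r + 1 := by
        simp [List.idxOf_cons, Ne.symm hc, hc]
      rw [this]
      simp

theorem pv_go_spec (l : List Char) : ∀ (fuel : Nat) (cur : List Char) (acc : List (List Char)),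
    l.length < fuel →
    PySem.Chars.splitOn.go ['\n'] fuel l cur acc =
      acc.reverse ++ (match pvS l with
        | [] => []
        | x :: xs => (cur.reverse ++ x) :: xs) := by
  induction l with
  | nil =>
    intro fuel cur acc hf
    cases fuel with
    | zero => omega
    | succ k => simp [PySem.Chars.splitOn.go, pvS]
  | cons ch r ih =>
    intro fuel cur acc hf
    cases fuel with
    | zero => omega
    | succ k =>
      by_cases hc : ch = '\n'
      · subst hc
        have hpre : List.isPrefixOf ['\n'] ('\n' :: r) = true := by simp [List.isPrefixOf]
        simp only [PySem.Chars.splitOn.go, hpre, if_true, List.length_cons,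
          List.length_nil, Nat.zero_add, List.drop_succ_cons, List.drop_zero, List.drop_one, List.tail_cons]
        rw [ih k [] (cur.reverse :: acc) (by simpa using Nat.lt_of_succ_lt_succ hf)]
        cases hS : pvS r with
        | nil => exact absurd hS (pvS_ne_nil r)
        | cons x xs => simp [pvS, hS]
      · have hpre : List.isPrefixOf ['\n'] (ch :: r) = false := by
          simp [List.isPrefixOf]; exact fun h => absurd h.symm hc
        simp only [PySem.Chars.splitOn.go, hpre]
        simp only [Bool.false_eq_true, if_false]
        rw [ih k (ch :: cur) acc (by simpa using Nat.lt_of_succ_lt_succ hf)]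
        cases hS : pvS r with
        | nil => exact absurd hS (pvS_ne_nil r)
        | cons x xs => simp [pvS, hS, hc]

theorem pvSplitOn_eq_S (c : List Char) : PySem.Chars.splitOn c ['\n'] = pvS c := by
  unfold PySem.Chars.splitOn
  rw [pv_go_spec c (c.length + 1) [] [] (by omega)]
  cases hS : pvS c with
  | nil => exact absurd hS (pvS_ne_nil c)
  | cons x xs => simp

theorem pvLoopA_acc (ls : List (List Char)) : ∀ (ret : List (List Char)),
    pvLoopA ls ret = ret ++ pvLoopA ls [] := by
  induction ls with
  | nil => intro ret; simp [pvLoopA]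
  | cons l t ih =>
    intro ret
    simp only [pvLoopA]
    split
    · simp
    · simp only [List.nil_append]
      rw [ih (ret ++ [l]), ih [l]]
      simp

theorem pv_prefnl {m : List Char} (hm : '\n' ∉ m) (u v : List Char) :
    m <+: u ++ '\n' :: v ↔ m <+: u := by
  constructor
  · intro h
    by_cases hlen : m.length ≤ u.length
    · exact List.prefix_of_prefix_length_le h (List.prefix_append u ('\n' :: v)) hlen
    · exfalso
      have hlt : u.length < m.length := by omega
      have hlen2 : m.length ≤ (u ++ '\n' :: v).length := h.length_le
      have := List.IsPrefix.getElem h (i := u.length) hlt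
      rw [List.getElem_append_right (by omega)] at this
      simp at this
      exact hm (this ▸ List.getElem_mem hlt)
  · intro h
    exact h.trans (List.prefix_append u ('\n' :: v))

theorem pv_find_go_shift (sub : List Char) (s : List Char) : ∀ (k : Nat),
    PySem.Chars.find.go sub s k =
      if PySem.Chars.find s sub = -1 then -1 else (k : Int) + PySem.Chars.find s sub := by
  induction s with
  | nil =>
    intro k
    simp only [PySem.Chars.find, PySem.Chars.find.go]
    by_cases h : sub.isEmpty <;> simp [h]
  | cons ch t ih =>
    intro k
    by_cases hp : List.isPrefixOf sub (ch :: t)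
    · simp [PySem.Chars.find, PySem.Chars.find.go, hp]
    · have e1 : PySem.Chars.find.go sub (ch :: t) k = PySem.Chars.find.go sub t (k + 1) := by
        simp [PySem.Chars.find.go, hp]
      have e0 : PySem.Chars.find (ch :: t) sub = PySem.Chars.find.go sub t 1 := by
        simp [PySem.Chars.find, PySem.Chars.find.go, hp]
      rw [e1, ih (k+1), e0, ih 1]
      by_cases hf : PySem.Chars.find t sub = -1
      · simp [hf]
      · have h0 := PySem.Chars.neg_one_le_find t sub
        have hne : ¬((1:Int) + PySem.Chars.find t sub = -1) := by omega
        simp only [hf, if_false]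
        split
        · omega
        · push_cast
          ring

theorem pv_mem_take_idxOf (s : List Char) : ∀ (k : Nat), k ≤ s.length →
    ('\n' ∈ s.take k ↔ List.idxOf '\n' s < k) := by
  induction s with
  | nil =>
    intro k hk
    have : k = 0 := by simpa using hk
    subst this; simp
  | cons ch r ih =>
    intro k hk
    cases k with
    | zero => simp
    | succ k' =>
      by_cases hc : ch = '\n'
      · subst hc; simp
      · simp only [List.take_succ_cons, List.mem_cons]
        rw [ih k' (by simpa using hk)]
        simp [Ne.symm hc, hc]

theorem pv_find_append_nl {m : List Char} (hm : '\n' ∉ m) (u v : List Char) :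
    PySem.Chars.find (u ++ '\n' :: v) m =
      if 0 ≤ PySem.Chars.find u m then PySem.Chars.find u m
      else if 0 ≤ PySem.Chars.find v m then (u.length : Int) + 1 + PySem.Chars.find v m
      else -1 := by
  induction u with
  | nil =>
    have hne : m ≠ [] → ¬ List.isPrefixOf m ('\n' :: v) = true := by
      intro h0 hp
      rw [List.isPrefixOf_iff_prefix] at hp
      cases m with
      | nil => exact h0 rfl
      | cons a t =>
        have : a = '\n' := by
          obtain ⟨w, hw⟩ := hp
          simpa using congrArg (fun l => l.head?) hw
        exact hm (by simp [this])
    cases hm0 : m with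
    | nil =>
      simp [PySem.Chars.find, PySem.Chars.find.go, List.isPrefixOf]
    | cons a t =>
      rw [← hm0]
      have h1 : PySem.Chars.find ('\n' :: v) m = PySem.Chars.find.go m v 1 := by
        simp [PySem.Chars.find, PySem.Chars.find.go, hne (by simp [hm0])]
      have h2 : PySem.Chars.find [] m = -1 := by
        simp [PySem.Chars.find, PySem.Chars.find.go, hm0, List.isEmpty]
      rw [List.nil_append, h1, pv_find_go_shift, h2]
      have h3 := PySem.Chars.neg_one_le_find v m
      by_cases hf : PySem.Chars.find v m = -1
      · simp [hf]
      · have : 0 ≤ PySem.Chars.find v m := by omega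
        simp only [hf, if_false, if_neg (by omega : ¬ (0:Int) ≤ -1), if_pos this]
        simp
  | cons ch u' ih =>
    by_cases hp : List.isPrefixOf m (ch :: (u' ++ '\n' :: v))
    · -- m is a prefix of the whole, hence of ch :: u'
      have hp' : m <+: ch :: u' := by
        rw [List.isPrefixOf_iff_prefix] at hp
        have := (pv_prefnl hm (ch :: u') v).mp (by simpa using hp)
        exact this
      have hp2 : List.isPrefixOf m (ch :: u') = true := by
        rw [List.isPrefixOf_iff_prefix]; exact hp'
      have l1 : PySem.Chars.find (ch :: u' ++ '\n' :: v) m = 0 := by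
        simp [PySem.Chars.find, PySem.Chars.find.go, hp]
      have l2 : PySem.Chars.find (ch :: u') m = 0 := by
        simp [PySem.Chars.find, PySem.Chars.find.go, hp2]
      rw [l1, l2]
      simp
    · have hp2 : ¬ List.isPrefixOf m (ch :: u') = true := by
        intro hq
        rw [List.isPrefixOf_iff_prefix] at hq hp
        exact hp (by simpa using (pv_prefnl hm (ch :: u') v).mpr hq)
      have l1 : PySem.Chars.find (ch :: u' ++ '\n' :: v) m
          = PySem.Chars.find.go m (u' ++ '\n' :: v) 1 := by
        simp [PySem.Chars.find, PySem.Chars.find.go, hp]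
      have l2 : PySem.Chars.find (ch :: u') m = PySem.Chars.find.go m u' 1 := by
        simp [PySem.Chars.find, PySem.Chars.find.go, hp2]
      rw [l1, pv_find_go_shift, ih, l2, pv_find_go_shift]
      have h3 := PySem.Chars.neg_one_le_find u' m
      have h4 := PySem.Chars.neg_one_le_find v m
      simp only [List.length_cons]
      push_cast
      split_ifs <;> omega

theorem pv_rfind_go_nl_neg (s : List Char) (h : '\n' ∉ s) : ∀ (j : Nat),
    PySem.Chars.rfind.go s ['\n'] j = -1 := by
  intro j
  induction j with
  | zero =>
    simp only [PySem.Chars.rfind.go]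
    rw [if_neg]
    intro hp
    rw [List.isPrefixOf_iff_prefix] at hp
    exact h (hp.mem (by simp))
  | succ j' ih =>
    simp only [PySem.Chars.rfind.go]
    rw [if_neg, ih]
    intro hp
    rw [List.isPrefixOf_iff_prefix] at hp
    exact h (List.mem_of_mem_drop (hp.mem (by simp)))

theorem pv_neg_one_le_rfind_go (s sub : List Char) : ∀ (j : Nat),
    -1 ≤ PySem.Chars.rfind.go s sub j := by
  intro j
  induction j with
  | zero => simp only [PySem.Chars.rfind.go]; split <;> simp
  | succ j' ih =>
    simp only [PySem.Chars.rfind.go]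
    split
    · omega
    · exact ih

theorem pv_rfind_go_ne_neg (s : List Char) (k : Nat) (hk : k < s.length)
    (hc : s[k] = '\n') : ∀ (j : Nat), k ≤ j → PySem.Chars.rfind.go s ['\n'] j ≠ -1 := by
  have hpre : List.isPrefixOf ['\n'] (s.drop k) = true := by
    rw [List.isPrefixOf_iff_prefix]
    rw [List.drop_eq_getElem_cons hk, hc]
    simp
  intro j
  induction j with
  | zero =>
    intro hj
    have : k = 0 := by omega
    subst this
    simp only [PySem.Chars.rfind.go]
    rw [if_pos (by simpa using hpre)]
    simp
  | succ j' ih =>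
    intro hj
    simp only [PySem.Chars.rfind.go]
    by_cases he : k = j' + 1
    · rw [if_pos (he ▸ hpre)]
      omega
    · have := ih (by omega)
      split
      · omega
      · exact this

theorem pv_rfind_nl_neg_iff (s : List Char) :
    PySem.Chars.rfind s ['\n'] = -1 ↔ '\n' ∉ s := by
  constructor
  · intro h hmem
    obtain ⟨k, hk, hck⟩ := List.mem_iff_getElem.mp hmem
    exact pv_rfind_go_ne_neg s k hk hck s.length (by omega) h
  · intro h
    exact pv_rfind_go_nl_neg s h s.length

theorem pv_neg_one_le_rfind (s sub : List Char) : -1 ≤ PySem.Chars.rfind s sub :=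
  pv_neg_one_le_rfind_go s sub s.length

-- position u.length always matches in u ++ '\n' :: w
theorem pv_rfind_go_at_len (u w : List Char) :
    PySem.Chars.rfind.go (u ++ '\n' :: w) ['\n'] u.length = (u.length : Int) := by
  have hpre : List.isPrefixOf ['\n'] ((u ++ '\n' :: w).drop u.length) = true := by
    rw [List.drop_append_of_le_length (by omega)]
    simp
  cases hu : u.length with
  | zero =>
    rw [hu, List.drop_zero] at hpre
    simp only [PySem.Chars.rfind.go]
    rw [if_pos hpre]
    simp
  | succ n =>
    rw [hu] at hpre
    simp only [PySem.Chars.rfind.go]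
    rw [if_pos hpre]

theorem pv_drop_shift (u w : List Char) (t : Nat) :
    (u ++ '\n' :: w).drop (u.length + 1 + t) = w.drop t := by
  rw [List.drop_append]
  rw [List.drop_of_length_le (by omega)]
  rw [show u.length + 1 + t - u.length = t + 1 by omega]
  simp

theorem pv_rfind_go_shift (u w : List Char) : ∀ (j : Nat),
    PySem.Chars.rfind.go (u ++ '\n' :: w) ['\n'] (u.length + 1 + j) =
      if PySem.Chars.rfind.go w ['\n'] j = -1 then (u.length : Int)
      else (u.length : Int) + 1 + PySem.Chars.rfind.go w ['\n'] j := by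
  intro j
  induction j with
  | zero =>
    rw [show u.length + 1 + 0 = u.length + 1 by omega]
    simp only [PySem.Chars.rfind.go]
    rw [show u.length + 1 = u.length + 1 + 0 by omega, pv_drop_shift u w 0, List.drop_zero]
    by_cases hp : List.isPrefixOf ['\n'] w = true
    · rw [if_pos hp, if_pos hp]
      split
      · omega
      · push_cast; ring
    · rw [if_neg hp, if_neg hp, pv_rfind_go_at_len]
      simp
  | succ j' ih =>
    rw [show u.length + 1 + (j' + 1) = (u.length + 1 + j') + 1 by omega]
    simp only [PySem.Chars.rfind.go]
    rw [show u.length + 1 + j' + 1 = u.length + 1 + (j' + 1) by omega, pv_drop_shift u w (j' + 1)]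
    by_cases hp : List.isPrefixOf ['\n'] (w.drop (j' + 1)) = true
    · rw [if_pos hp, if_pos hp]
      split
      · omega
      · push_cast; ring
    · rw [if_neg hp, if_neg hp, ih]

theorem pv_rfind_append_nl (u w : List Char) :
    PySem.Chars.rfind (u ++ '\n' :: w) ['\n'] =
      if PySem.Chars.rfind w ['\n'] = -1 then (u.length : Int)
      else (u.length : Int) + 1 + PySem.Chars.rfind w ['\n'] := by
  unfold PySem.Chars.rfind
  rw [show (u ++ '\n' :: w).length = u.length + 1 + w.length by simp; omega]
  exact pv_rfind_go_shift u w w.length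

theorem pv_rfindFrom_zero (s sub : List Char) (e : Int) (h0 : 0 ≤ e) (hle : e ≤ (s.length : Int)) :
    PySem.Chars.rfindFrom s sub 0 (some e) = PySem.Chars.rfind (s.take e.toNat) sub := by
  simp only [PySem.Chars.rfindFrom]
  rw [if_neg (by omega : ¬ (s.length : Int) < e), if_neg (by omega : ¬ e < 0)]
  norm_num
  rw [if_neg (by omega : ¬ e < 0)]
  split
  · omega
  · rfl

theorem pv_decomp (c : List Char) (h : '\n' ∈ c) :
    c = c.take (List.idxOf '\n' c) ++ '\n' :: c.drop (List.idxOf '\n' c + 1) ∧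
    (c.take (List.idxOf '\n' c)).length = List.idxOf '\n' c := by
  have hlt : List.idxOf '\n' c < c.length := List.idxOf_lt_length_of_mem h
  constructor
  · conv_lhs => rw [← List.take_append_drop (List.idxOf '\n' c) c]
    congr 1
    rw [List.drop_eq_getElem_cons hlt]
    congr 1
    exact List.getElem_idxOf hlt
  · simp [List.length_take]
    omega

theorem pv_not_nl_take_idxOf (c : List Char) : '\n' ∉ c.take (List.idxOf '\n' c) := by
  by_cases h : '\n' ∈ c
  · have hlt : List.idxOf '\n' c < c.length := List.idxOf_lt_length_of_mem h
    intro hmem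
    have := (pv_mem_take_idxOf c (List.idxOf '\n' c) (by omega)).mp hmem
    omega
  · intro hmem
    exact h (List.mem_of_mem_take hmem)

theorem pv_firstline_iff {m : List Char} (hm : '\n' ∉ m) (r : List Char) :
    (PySem.Chars.isIn m (r.take (List.idxOf '\n' r)) = true ↔
      0 ≤ PySem.Chars.find r m ∧ PySem.Chars.find r m ≤ (List.idxOf '\n' r : Int)) := by
  constructor
  · intro h
    rw [PySem.Chars.isIn, bne_iff_ne] at h
    have hge := PySem.Chars.neg_one_le_find (r.take (List.idxOf '\n' r)) m
    have h0 : 0 ≤ PySem.Chars.find (r.take (List.idxOf '\n' r)) m := by omega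
    obtain ⟨hp, _⟩ := PySem.Chars.find_spec (s := r.take (List.idxOf '\n' r)) (sub := m) h0
    set j := (PySem.Chars.find (r.take (List.idxOf '\n' r)) m).toNat with hj
    have hpr : m <+: r.drop j := by
      have h1 : (r.take (List.idxOf '\n' r)).drop j <+: r.drop j := by
        rw [List.drop_take]
        exact List.take_prefix _ _
      exact hp.trans h1
    have hfind : 0 ≤ PySem.Chars.find r m := by
      rw [PySem.Chars.find_nonneg_iff]
      exact (hpr.isInfix).trans (List.drop_suffix j r).isInfix
    have hjle : (j : Int) ≤ (List.idxOf '\n' r : Int) := by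
      have h1 := PySem.Chars.find_le_length (r.take (List.idxOf '\n' r)) m
      have h2 : ((r.take (List.idxOf '\n' r)).length : Int) ≤ (List.idxOf '\n' r : Int) := by
        simp [List.length_take]
      have h3 := Int.toNat_of_nonneg h0
      omega
    have hmin : (PySem.Chars.find r m).toNat ≤ j := by
      by_contra hlt
      push_neg at hlt
      exact (PySem.Chars.find_spec hfind).2 j hlt hpr
    have h4 := Int.toNat_of_nonneg hfind
    exact ⟨hfind, by omega⟩
  · rintro ⟨h0, hle⟩
    rw [PySem.Chars.isIn, bne_iff_ne]
    obtain ⟨hp, _⟩ := PySem.Chars.find_spec (s := r) (sub := m) h0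
    set j := (PySem.Chars.find r m).toNat with hj
    have hjle : j ≤ List.idxOf '\n' r := by
      have := Int.toNat_of_nonneg h0
      omega
    have hocc : m <+: (r.take (List.idxOf '\n' r)).drop j := by
      by_cases hmem : '\n' ∈ r
      · obtain ⟨hdec, hlen⟩ := pv_decomp r hmem
        have hdrop : r.drop j = (r.take (List.idxOf '\n' r)).drop j ++ '\n' :: r.drop (List.idxOf '\n' r + 1) := by
          conv_lhs => rw [hdec]
          rw [List.drop_append_of_le_length (by omega)]
        rw [hdrop] at hp
        exact (pv_prefnl hm _ _).mp hp
      · rw [List.take_of_length_le (by rw [List.idxOf_eq_length_iff.mpr hmem])]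
        exact hp
    have hne : PySem.Chars.find (r.take (List.idxOf '\n' r)) m ≠ -1 := by
      rw [Ne, PySem.Chars.find_eq_neg_one_iff]
      intro hni
      exact hni (hocc.isInfix.trans (List.drop_suffix j _).isInfix)
    exact hne


def pvAC (c : List Char) : List Char :=
  PySem.Chars.join ['\n'] (pvLoopA (PySem.Chars.splitOn c ['\n']) [])

def pvBC (c : List Char) : List Char :=
  let i1 := PySem.Chars.find c pvM1
  let i2 := PySem.Chars.find c pvM2
  if i1 = -1 ∧ i2 = -1 then c
  else
    let idx := if i1 = -1 then i2 else if i2 = -1 then i1 else min i1 i2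
    let start := PySem.Chars.rfindFrom c ['\n'] 0 (some idx)
    if start = -1 then [] else PySem.Chars.slice c none (some start)

theorem pvAC_base (c : List Char) (h : '\n' ∉ c) :
    pvAC c = if pvHasMain c then [] else c := by
  unfold pvAC
  rw [pvSplitOn_eq_S, pvS_no_nl c h]
  simp only [pvLoopA]
  split
  · rfl
  · simp [PySem.Chars.join, List.intercalate, List.intersperse]

theorem pvAC_step (a r : List Char) (h : '\n' ∉ a) :
    pvAC (a ++ '\n' :: r) =
      if pvHasMain a then []
      else if pvHasMain (r.take (List.idxOf '\n' r)) then a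
      else a ++ '\n' :: pvAC r := by
  unfold pvAC
  rw [pvSplitOn_eq_S, pvS_append a r h]
  simp only [pvLoopA]
  by_cases hma : pvHasMain a
  · rw [if_pos hma, if_pos hma]
    rfl
  · rw [if_neg hma, if_neg hma]
    rw [pvLoopA_acc]
    obtain ⟨t, ht⟩ := pvS_head r
    rw [ht]
    simp only [pvLoopA, List.nil_append]
    by_cases hfl : pvHasMain (r.take (List.idxOf '\n' r))
    · rw [if_pos hfl, if_pos hfl]
      simp [PySem.Chars.join, List.intercalate, List.intersperse]
    · rw [if_neg hfl, if_neg hfl]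
      rw [pvLoopA_acc t [r.take (List.idxOf '\n' r)]]
      rw [pvSplitOn_eq_S, ht]
      simp only [pvLoopA, if_neg hfl, List.nil_append]
      rw [pvLoopA_acc t [r.take (List.idxOf '\n' r)]]
      simp only [List.singleton_append]
      rw [PySem.Chars.join_cons_cons]
      simp

def pvHasMg (m1 m2 : List Char) (l : List Char) : Bool :=
  PySem.Chars.isIn m1 l || PySem.Chars.isIn m2 l

def pvBCg (m1 m2 : List Char) (c : List Char) : List Char :=
  let i1 := PySem.Chars.find c m1
  let i2 := PySem.Chars.find c m2
  if i1 = -1 ∧ i2 = -1 then c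
  else
    let idx := if i1 = -1 then i2 else if i2 = -1 then i1 else min i1 i2
    let start := PySem.Chars.rfindFrom c ['\n'] 0 (some idx)
    if start = -1 then [] else PySem.Chars.slice c none (some start)

theorem pvBC_eq_gen (c : List Char) : pvBC c = pvBCg pvM1 pvM2 c := rfl
theorem pvHasMain_eq_gen (l : List Char) : pvHasMain l = pvHasMg pvM1 pvM2 l := rfl

theorem pvHasMg_eq (m1 m2 l : List Char) :
    pvHasMg m1 m2 l = ((PySem.Chars.find l m1 != -1) || (PySem.Chars.find l m2 != -1)) := rfl

theorem pvBCg_base (m1 m2 c : List Char) (h : '\n' ∉ c) :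
    pvBCg m1 m2 c = if pvHasMg m1 m2 c then [] else c := by
  simp only [pvBCg]
  rw [pvHasMg_eq]
  have b1 := PySem.Chars.neg_one_le_find c m1
  have b2 := PySem.Chars.neg_one_le_find c m2
  have l1 := PySem.Chars.find_le_length c m1
  have l2 := PySem.Chars.find_le_length c m2
  set x1 := PySem.Chars.find c m1 with hx1
  set x2 := PySem.Chars.find c m2 with hx2
  by_cases h1 : x1 = -1 <;> by_cases h2 : x2 = -1
  · rw [if_pos ⟨h1, h2⟩, if_neg (by simp only [Bool.or_eq_true, bne_iff_ne]; tauto)]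
  all_goals {
    rw [if_neg (by tauto)]
    have hidx : 0 ≤ (if x1 = -1 then x2 else if x2 = -1 then x1 else min x1 x2) ∧
        (if x1 = -1 then x2 else if x2 = -1 then x1 else min x1 x2) ≤ (c.length : Int) := by
      split_ifs <;> constructor <;> (try simp only [le_min_iff, min_le_iff]) <;> omega
    rw [pv_rfindFrom_zero _ _ _ hidx.1 hidx.2]
    rw [if_pos ((pv_rfind_nl_neg_iff _).mpr (fun hm => h (List.mem_of_mem_take hm)))]
    rw [if_pos (by simp only [Bool.or_eq_true, bne_iff_ne]; tauto)]
  }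

theorem pv_c_len (a r : List Char) : (a ++ '\n' :: r).length = a.length + 1 + r.length := by
  simp; omega

theorem pv_take_shift (a r : List Char) (t : Nat) :
    (a ++ '\n' :: r).take (a.length + 1 + t) = a ++ '\n' :: r.take t := by
  rw [List.take_append, List.take_of_length_le (by omega)]
  rw [show a.length + 1 + t - a.length = t + 1 by omega]
  simp

theorem pv_rfindFrom_in_a (a r : List Char) (h : '\n' ∉ a) (idx : Int)
    (h0 : 0 ≤ idx) (hA : idx ≤ (a.length : Int)) :
    PySem.Chars.rfindFrom (a ++ '\n' :: r) ['\n'] 0 (some idx) = -1 := by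
  rw [pv_rfindFrom_zero _ _ _ h0 (by rw [pv_c_len]; push_cast; omega)]
  apply (pv_rfind_nl_neg_iff _).mpr
  intro hmem
  rw [List.take_append, show idx.toNat - a.length = 0 by omega] at hmem
  simp only [List.take_zero, List.append_nil] at hmem
  exact h (List.mem_of_mem_take hmem)

theorem pv_hasMg_FL (m1 m2 : List Char) (hm1 : '\n' ∉ m1) (hm2 : '\n' ∉ m2) (r : List Char) :
    pvHasMg m1 m2 (r.take (List.idxOf '\n' r)) = true ↔
      ((0 ≤ PySem.Chars.find r m1 ∧ PySem.Chars.find r m1 ≤ (List.idxOf '\n' r : Int)) ∨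
       (0 ≤ PySem.Chars.find r m2 ∧ PySem.Chars.find r m2 ≤ (List.idxOf '\n' r : Int))) := by
  simp only [pvHasMg, Bool.or_eq_true]
  rw [pv_firstline_iff hm1, pv_firstline_iff hm2]

theorem pv_rfindFrom_in_r (a r : List Char) (h : '\n' ∉ a) (jr : Int)
    (h0 : 0 ≤ jr) (hr : jr ≤ (r.length : Int)) :
    PySem.Chars.rfindFrom (a ++ '\n' :: r) ['\n'] 0 (some ((a.length : Int) + 1 + jr)) =
      if PySem.Chars.rfind (r.take jr.toNat) ['\n'] = -1 then (a.length : Int)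
      else (a.length : Int) + 1 + PySem.Chars.rfind (r.take jr.toNat) ['\n'] := by
  rw [pv_rfindFrom_zero _ _ _ (by omega) (by rw [pv_c_len]; push_cast; omega)]
  rw [show ((a.length : Int) + 1 + jr).toNat = a.length + 1 + jr.toNat by omega]
  rw [pv_take_shift]
  exact pv_rfind_append_nl a (r.take jr.toNat)

theorem pv_slice_take (r : List Char) (s : Int) (hs : 0 ≤ s) :
    PySem.Chars.slice r none (some s) = r.take s.toNat := by
  rw [PySem.Chars.slice_eq_listSlice, PySem.List.slice_to _ hs]

theorem pv_slice_a (a r : List Char) :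
    PySem.Chars.slice (a ++ '\n' :: r) none (some (a.length : Int)) = a := by
  rw [pv_slice_take _ _ (by omega)]
  rw [Int.toNat_natCast, List.take_left]

theorem pv_slice_shift (a r : List Char) (s : Int) (hs : 0 ≤ s) :
    PySem.Chars.slice (a ++ '\n' :: r) none (some ((a.length : Int) + 1 + s)) = a ++ '\n' :: r.take s.toNat := by
  rw [pv_slice_take _ _ (by omega)]
  rw [show ((a.length : Int) + 1 + s).toNat = a.length + 1 + s.toNat by omega]
  exact pv_take_shift a r s.toNat

theorem pv_tail_in_r (m1 m2 : List Char) (hm1 : '\n' ∉ m1) (hm2 : '\n' ∉ m2)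
    (a r : List Char) (h : '\n' ∉ a) (jr : Int)
    (h0 : 0 ≤ jr) (hl : jr ≤ (r.length : Int))
    (hatt : jr = PySem.Chars.find r m1 ∨ jr = PySem.Chars.find r m2)
    (hlb1 : PySem.Chars.find r m1 = -1 ∨ jr ≤ PySem.Chars.find r m1)
    (hlb2 : PySem.Chars.find r m2 = -1 ∨ jr ≤ PySem.Chars.find r m2)
    (hidxr : (if PySem.Chars.find r m1 = -1 then PySem.Chars.find r m2
              else if PySem.Chars.find r m2 = -1 then PySem.Chars.find r m1
              else min (PySem.Chars.find r m1) (PySem.Chars.find r m2)) = jr) :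
    (if (if PySem.Chars.rfind (r.take jr.toNat) ['\n'] = -1 then (a.length : Int)
         else (a.length : Int) + 1 + PySem.Chars.rfind (r.take jr.toNat) ['\n']) = -1 then []
     else PySem.Chars.slice (a ++ '\n' :: r) none
       (some (if PySem.Chars.rfind (r.take jr.toNat) ['\n'] = -1 then (a.length : Int)
              else (a.length : Int) + 1 + PySem.Chars.rfind (r.take jr.toNat) ['\n']))) =
      if pvHasMg m1 m2 (r.take (List.idxOf '\n' r)) then a
      else a ++ '\n' :: pvBCg m1 m2 r := by
  have hFL := pv_hasMg_FL m1 m2 hm1 hm2 r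
  have hIl : List.idxOf '\n' r ≤ r.length := List.idxOf_le_length
  have hmem := pv_mem_take_idxOf r jr.toNat (by omega)
  set J1 := PySem.Chars.find r m1 with hJ1def
  set J2 := PySem.Chars.find r m2 with hJ2def
  set In := List.idxOf '\n' r with hIn
  set s := PySem.Chars.rfind (r.take jr.toNat) ['\n'] with hs
  have bs : -1 ≤ s := pv_neg_one_le_rfind _ _
  by_cases hw : s = -1
  · rw [if_pos hw]
    rw [if_neg (show ¬(a.length : Int) = -1 by omega)]
    rw [pv_slice_a]
    have hnm : '\n' ∉ r.take jr.toNat := (pv_rfind_nl_neg_iff _).mp (by rw [← hs]; exact hw)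
    have hle : ¬ (In < jr.toNat) := fun hlt => hnm (hmem.mpr hlt)
    rw [if_pos (hFL.mpr (by omega))]
  · rw [if_neg hw]
    rw [if_neg (show ¬((a.length : Int) + 1 + s) = -1 by omega)]
    rw [pv_slice_shift a r s (by omega)]
    have hmm : '\n' ∈ r.take jr.toNat := by
      by_contra hq
      exact hw (by rw [hs]; exact (pv_rfind_nl_neg_iff _).mpr hq)
    have hlt : In < jr.toNat := hmem.mp hmm
    rw [if_neg (show ¬ pvHasMg m1 m2 (r.take In) = true from fun hT => by
      have := hFL.mp hT; omega)]
    have hBCr : pvBCg m1 m2 r = r.take s.toNat := by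
      simp only [pvBCg]
      rw [← hJ1def, ← hJ2def]
      rw [if_neg (show ¬(J1 = -1 ∧ J2 = -1) by omega)]
      rw [hidxr]
      rw [pv_rfindFrom_zero r _ jr (by omega) (by omega)]
      rw [← hs]
      rw [if_neg hw]
      rw [pv_slice_take r s (by omega)]
    rw [hBCr]

theorem pvBCg_step (m1 m2 : List Char) (hm1 : '\n' ∉ m1) (hm2 : '\n' ∉ m2)
    (a r : List Char) (h : '\n' ∉ a) :
    pvBCg m1 m2 (a ++ '\n' :: r) =
      if pvHasMg m1 m2 a then []
      else if pvHasMg m1 m2 (r.take (List.idxOf '\n' r)) then a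
      else a ++ '\n' :: pvBCg m1 m2 r := by
  conv_lhs => simp only [pvBCg]
  rw [pv_find_append_nl hm1 a r, pv_find_append_nl hm2 a r]
  have bK1 := PySem.Chars.neg_one_le_find a m1
  have bK2 := PySem.Chars.neg_one_le_find a m2
  have bJ1 := PySem.Chars.neg_one_le_find r m1
  have bJ2 := PySem.Chars.neg_one_le_find r m2
  have lK1 := PySem.Chars.find_le_length a m1
  have lK2 := PySem.Chars.find_le_length a m2
  have lJ1 := PySem.Chars.find_le_length r m1
  have lJ2 := PySem.Chars.find_le_length r m2
  set K1 := PySem.Chars.find a m1 with hK1def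
  set K2 := PySem.Chars.find a m2 with hK2def
  set J1 := PySem.Chars.find r m1 with hJ1def
  set J2 := PySem.Chars.find r m2 with hJ2def
  rcases (by omega : 0 ≤ K1 ∨ K1 = -1) with hk1 | hk1
  · rw [if_pos hk1]
    rw [if_pos (show pvHasMg m1 m2 a = true by
      rw [pvHasMg_eq]; simp only [Bool.or_eq_true, bne_iff_ne]; omega)]
    rcases (by omega : 0 ≤ K2 ∨ K2 = -1) with hk2 | hk2
    · rw [if_pos hk2]
      rw [if_neg (show ¬(K1 = -1 ∧ K2 = -1) by omega)]
      rw [if_neg (show ¬K1 = -1 by omega), if_neg (show ¬K2 = -1 by omega)]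
      rw [pv_rfindFrom_in_a a r h (min K1 K2) (by omega) (by omega)]
      rw [if_pos rfl]
    · rw [if_neg (show ¬(0:Int) ≤ K2 by omega)]
      rcases (by omega : 0 ≤ J2 ∨ J2 = -1) with hj2 | hj2
      · rw [if_pos hj2]
        rw [if_neg (show ¬(K1 = -1 ∧ (a.length:Int)+1+J2 = -1) by omega)]
        rw [if_neg (show ¬K1 = -1 by omega), if_neg (show ¬((a.length:Int)+1+J2) = -1 by omega)]
        rw [pv_rfindFrom_in_a a r h (min K1 ((a.length:Int)+1+J2)) (by omega) (by omega)]
        rw [if_pos rfl]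
      · rw [if_neg (show ¬(0:Int) ≤ J2 by omega)]
        rw [if_neg (show ¬(K1 = -1 ∧ (-1:Int) = -1) by omega)]
        rw [if_neg (show ¬K1 = -1 by omega), if_pos rfl]
        rw [pv_rfindFrom_in_a a r h K1 (by omega) (by omega)]
        rw [if_pos rfl]
  · rw [if_neg (show ¬(0:Int) ≤ K1 by omega)]
    rcases (by omega : 0 ≤ K2 ∨ K2 = -1) with hk2 | hk2
    · rw [if_pos hk2]
      rw [if_pos (show pvHasMg m1 m2 a = true by
        rw [pvHasMg_eq]; simp only [Bool.or_eq_true, bne_iff_ne]; omega)]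
      rcases (by omega : 0 ≤ J1 ∨ J1 = -1) with hj1 | hj1
      · rw [if_pos hj1]
        rw [if_neg (show ¬((a.length:Int)+1+J1 = -1 ∧ K2 = -1) by omega)]
        rw [if_neg (show ¬((a.length:Int)+1+J1) = -1 by omega), if_neg (show ¬K2 = -1 by omega)]
        rw [pv_rfindFrom_in_a a r h (min ((a.length:Int)+1+J1) K2) (by omega) (by omega)]
        rw [if_pos rfl]
      · rw [if_neg (show ¬(0:Int) ≤ J1 by omega)]
        rw [if_neg (show ¬((-1:Int) = -1 ∧ K2 = -1) by omega)]
        rw [if_pos rfl]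
        rw [pv_rfindFrom_in_a a r h K2 (by omega) (by omega)]
        rw [if_pos rfl]
    · rw [if_neg (show ¬(0:Int) ≤ K2 by omega)]
      rw [if_neg (show ¬ pvHasMg m1 m2 a = true from fun hT => by
        rw [pvHasMg_eq] at hT
        simp only [Bool.or_eq_true, bne_iff_ne] at hT
        omega)]
      rcases (by omega : 0 ≤ J1 ∨ J1 = -1) with hj1 | hj1 <;>
        rcases (by omega : 0 ≤ J2 ∨ J2 = -1) with hj2 | hj2
      · rw [if_pos hj1, if_pos hj2]
        rw [if_neg (show ¬((a.length:Int)+1+J1 = -1 ∧ (a.length:Int)+1+J2 = -1) by omega)]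
        rw [if_neg (show ¬((a.length:Int)+1+J1) = -1 by omega),
            if_neg (show ¬((a.length:Int)+1+J2) = -1 by omega)]
        rw [show min ((a.length:Int)+1+J1) ((a.length:Int)+1+J2) = (a.length:Int)+1+min J1 J2 by omega]
        rw [pv_rfindFrom_in_r a r h (min J1 J2) (by omega) (by omega)]
        exact pv_tail_in_r m1 m2 hm1 hm2 a r h (min J1 J2) (by omega) (by omega)
          (by rcases le_total J1 J2 with hc | hc
              · exact Or.inl (by omega)
              · exact Or.inr (by omega))
          (by omega) (by omega)
          (by rw [if_neg (show ¬J1 = -1 by omega), if_neg (show ¬J2 = -1 by omega)])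
      · rw [if_pos hj1, if_neg (show ¬(0:Int) ≤ J2 by omega)]
        rw [if_neg (show ¬((a.length:Int)+1+J1 = -1 ∧ (-1:Int) = -1) by omega)]
        rw [if_neg (show ¬((a.length:Int)+1+J1) = -1 by omega), if_pos rfl]
        rw [pv_rfindFrom_in_r a r h J1 (by omega) (by omega)]
        exact pv_tail_in_r m1 m2 hm1 hm2 a r h J1 (by omega) (by omega)
          (Or.inl rfl) (by omega) (by omega)
          (by rw [if_neg (show ¬J1 = -1 by omega), if_pos hj2])
      · rw [if_neg (show ¬(0:Int) ≤ J1 by omega), if_pos hj2]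
        rw [if_neg (show ¬((-1:Int) = -1 ∧ (a.length:Int)+1+J2 = -1) by omega)]
        rw [if_pos rfl]
        rw [pv_rfindFrom_in_r a r h J2 (by omega) (by omega)]
        exact pv_tail_in_r m1 m2 hm1 hm2 a r h J2 (by omega) (by omega)
          (Or.inr rfl) (by omega) (by omega)
          (by rw [if_pos hj1])
      · rw [if_neg (show ¬(0:Int) ≤ J1 by omega), if_neg (show ¬(0:Int) ≤ J2 by omega)]
        rw [if_pos ⟨rfl, rfl⟩]
        have hFL := pv_hasMg_FL m1 m2 hm1 hm2 r
        rw [if_neg (show ¬ pvHasMg m1 m2 (r.take (List.idxOf '\n' r)) = true from fun hT => by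
          have := hFL.mp hT; omega)]
        have hBCr : pvBCg m1 m2 r = r := by
          simp only [pvBCg]
          rw [← hJ1def, ← hJ2def]
          rw [if_pos ⟨hj1, hj2⟩]
        rw [hBCr]

theorem pv_nl_M1 : '\n' ∉ pvM1 := by decide
theorem pv_nl_M2 : '\n' ∉ pvM2 := by decide

theorem pvAC_eq_BC_aux : ∀ (n : Nat) (c : List Char), c.length ≤ n →
    pvAC c = pvBCg pvM1 pvM2 c := by
  intro n
  induction n with
  | zero =>
    intro c hc
    have hce : c = [] := by cases c <;> simp_all
    subst hce
    rw [pvAC_base [] (by simp), pvBCg_base pvM1 pvM2 [] (by simp), pvHasMain_eq_gen]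
  | succ n ih =>
    intro c hc
    by_cases hnl : '\n' ∈ c
    · obtain ⟨hdec, hlen⟩ := pv_decomp c hnl
      have hna : '\n' ∉ c.take (List.idxOf '\n' c) := pv_not_nl_take_idxOf c
      have hlt : List.idxOf '\n' c < c.length := List.idxOf_lt_length_of_mem hnl
      have hrlen : (c.drop (List.idxOf '\n' c + 1)).length ≤ n := by
        rw [List.length_drop]; omega
      conv_lhs => rw [hdec]
      conv_rhs => rw [hdec]
      rw [pvAC_step _ _ hna, pvBCg_step pvM1 pvM2 pv_nl_M1 pv_nl_M2 _ _ hna]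
      rw [pvHasMain_eq_gen, pvHasMain_eq_gen]
      rw [ih _ hrlen]
    · rw [pvAC_base c hnl, pvBCg_base pvM1 pvM2 c hnl, pvHasMain_eq_gen]

theorem pvAC_eq_BC (c : List Char) : pvAC c = pvBC c := by
  rw [pvBC_eq_gen]
  exact pvAC_eq_BC_aux c.length c le_rfl

theorem pvAlt_toList (f : String) :
    (filter_main_py_alt f).toList = pvBC f.toList := by
  unfold filter_main_py_alt pvBC
  simp only [PySem.Str.find_eq, PySem.Str.rfindFrom_eq, PySem.Str.slice]
  simp only [pvM1, pvM2]
  split_ifs <;> simp_all [PySem.Chars.slice_eq_listSlice]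

-- ===== VERDICT (by name: the statement is the Claim_ definition above) =====
theorem filter_main_py_spec : Claim_equal_filter_main_py := by
  intro f _
  unfold Spec_filter_main_py
  have h1 : filter_main_py f = String.ofList (pvAC f.toList) := rfl
  rw [h1, pvAC_eq_BC, ← pvAlt_toList, String.ofList_toList]
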